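-- pv_equiv track=rewrite | github.com/Yan56bgd/Homework-Py | Homework 8/HM 8.py | peano_traversal
-- ===== SOURCE A (Python) =====
-- from typing import List, Tuple, Generator, Callable, Any
--
-- def linear_traversal(image: List[List[Any]]) -> Generator[Tuple[int, int, Any], None, None]:
--     """Линейный построчный обход изображения."""
--     h, w = len(image), len(image[0])
--     for i in range(h):
--         for j in range(w):
--             yield (i, j, image[i][j])
--
-- def peano_traversal(image: List[List[Any]]) -> Generator[Tuple[int, int, Any], None, None]:
--     """Развертка Пеано для квадратных изображений размера 3^n."""
--     h = len(image)
--     w = len(image[0])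
--
--     # Проверяем, является ли изображение квадратным и степенью 3
--     if h != w:
--         yield from linear_traversal(image)
--         return
--
--     # Проверяем, является ли размер степенью 3
--     size = h
--     n = 0
--     temp = size
--     while temp % 3 == 0 and temp > 1:
--         temp //= 3
--         n += 1
--     if temp != 1:
--         yield from linear_traversal(image)
--         return
--
--     # Рекурсивная функция для генерации кривой Пеано
--     def peano_curve_rec(x: int, y: int, size: int, n: int, direction: int) -> Generator[Tuple[int, int], None, None]:
--         if n == 0:
--             yield (x, y)
--         else:
--             sub_size = size // 3
--             if direction == 0:  # normal direction
--                 order = [(0, 0), (0, 1), (0, 2), (1, 2), (1, 1), (1, 0), (2, 0), (2, 1), (2, 2)]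
--                 next_dir = [0, 1, 0, 0, 1, 1, 1, 0, 1]
--             else:  # reversed direction
--                 order = [(0, 2), (0, 1), (0, 0), (1, 0), (1, 1), (1, 2), (2, 2), (2, 1), (2, 0)]
--                 next_dir = [1, 0, 1, 1, 0, 0, 0, 1, 0]
--
--             for (i, j), nd in zip(order, next_dir):
--                 new_x = x + i * sub_size
--                 new_y = y + j * sub_size
--                 yield from peano_curve_rec(new_x, new_y, sub_size, n - 1, nd)
--
--     for i, j in peano_curve_rec(0, 0, size, n, 0):
--         yield (i, j, image[i][j])
-- ===== SOURCE B (Python) =====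
-- from typing import List, Tuple, Generator, Any
--
-- def peano_traversal(image: List[List[Any]]) -> Generator[Tuple[int, int, Any], None, None]:
--     """Peano traversal for 3^n square images; built iteratively level by level (bottom-up, no recursion)."""
--     h = len(image)
--     w = len(image[0])
--     is_peano = False
--     if h == w:
--         temp = h
--         n = 0
--         while temp % 3 == 0 and temp > 1:
--             temp //= 3
--             n += 1
--         is_peano = (temp == 1)
--     if not is_peano:
--         for i in range(h):
--             for j in range(w):
--                 yield (i, j, image[i][j])
--         return
--     # Bottom-up construction: path for the direction-0 curve; a direction-1
--     # sub-curve is the direction-0 one mirrored in y (y -> s-1-y).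
--     order = [(0, 0), (0, 1), (0, 2), (1, 2), (1, 1), (1, 0), (2, 0), (2, 1), (2, 2)]
--     flips = [0, 1, 0, 0, 1, 1, 1, 0, 1]
--     path = [(0, 0)]
--     s = 1
--     for _ in range(n):
--         new = []
--         for (i, j), f in zip(order, flips):
--             if f == 0:
--                 new.extend((i * s + x, j * s + y) for x, y in path)
--             else:
--                 new.extend((i * s + x, j * s + (s - 1 - y)) for x, y in path)
--         path = new
--         s *= 3
--     for x, y in path:
--         yield (x, y, image[x][y])
-- ===== Notes on version B (the rewrite author's own statement) =====
-- stated objective: alternative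
-- what changed: Replaces A's top-down recursive generator (which reaches every cell through a chain of log3(n) nested yield-from frames and tracks a direction flag per sub-square) with a bottom-up iterative construction that builds the whole Peano path level by level from the single starting cell, using the fact that the reversed-direction sub-curve is the y-mirror (y -> s-1-y) of the normal one.
import Mathlib
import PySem

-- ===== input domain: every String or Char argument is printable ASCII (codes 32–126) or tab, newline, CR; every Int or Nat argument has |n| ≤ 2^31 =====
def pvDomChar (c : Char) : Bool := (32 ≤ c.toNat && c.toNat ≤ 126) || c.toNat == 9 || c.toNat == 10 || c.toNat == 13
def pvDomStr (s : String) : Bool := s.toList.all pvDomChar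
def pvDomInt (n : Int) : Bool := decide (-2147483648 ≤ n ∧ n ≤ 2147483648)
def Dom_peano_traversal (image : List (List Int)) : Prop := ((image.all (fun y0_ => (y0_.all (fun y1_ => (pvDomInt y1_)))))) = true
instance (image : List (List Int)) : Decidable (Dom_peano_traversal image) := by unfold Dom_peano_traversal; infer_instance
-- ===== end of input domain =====

-- B replaces A's top-down recursive generator of the Peano curve with a bottom-up
-- iterative construction of the path (the reversed sub-curve is the y-mirror of
-- the normal one): a different algorithm of the same cost.


-- ===== PORT A =====

-- linear_traversal: row-major double loop
def pvLinear (image : List (List Int)) : List (Int × Int × Int) :=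
  let h : Int := image.length
  let w : Int := (PySem.List.pyGetD image 0 []).length
  (PySem.List.pyRange 0 h 1).foldl (fun acc i =>
    acc ++ (PySem.List.pyRange 0 w 1).map (fun j =>
      (i, j, PySem.List.pyGetD (PySem.List.pyGetD image i []) j 0))) []

-- the 'while temp % 3 == 0 and temp > 1' loop (fuel makes it total; fuel = size.toNat suffices)
def pvDiv3Loop : Nat → Int × Int → Int × Int
  | 0, st => st
  | fuel + 1, (temp, n) =>
    if PySem.Int.mod temp 3 = 0 ∧ temp > 1 then
      pvDiv3Loop fuel (PySem.Int.floordiv temp 3, n + 1)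
    else (temp, n)

-- order / next_dir tables of peano_curve_rec, zipped
def pvOrder0 : List ((Int × Int) × Int) :=
  [((0,0),0),((0,1),1),((0,2),0),((1,2),0),((1,1),1),((1,0),1),((2,0),1),((2,1),0),((2,2),1)]
def pvOrder1 : List ((Int × Int) × Int) :=
  [((0,2),1),((0,1),0),((0,0),1),((1,0),1),((1,1),0),((1,2),0),((2,2),0),((2,1),1),((2,0),0)]

-- peano_curve_rec (recursion on n, which A decrements to 0)
def pvPeanoRec : Nat → Int → Int → Int → Int → List (Int × Int)
  | 0, x, y, _, _ => [(x, y)]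
  | n + 1, x, y, size, direction =>
    let sub := PySem.Int.floordiv size 3
    let tbl := if direction = 0 then pvOrder0 else pvOrder1
    tbl.foldl (fun acc p =>
      acc ++ pvPeanoRec n (x + p.1.1 * sub) (y + p.1.2 * sub) sub p.2) []

def peano_traversal (image : List (List Int)) : List (Int × Int × Int) :=
  let h : Int := image.length
  let w : Int := (PySem.List.pyGetD image 0 []).length
  if h ≠ w then pvLinear image
  else
    let size := h
    let st := pvDiv3Loop size.toNat (size, 0)
    if st.1 ≠ 1 then pvLinear image
    else (pvPeanoRec st.2.toNat 0 0 size 0).map (fun p =>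
      (p.1, p.2, PySem.List.pyGetD (PySem.List.pyGetD image p.1 []) p.2 0))

-- ===== PORT B =====

-- B's order and flips tables
def pvOrderB : List (Int × Int) :=
  [(0,0),(0,1),(0,2),(1,2),(1,1),(1,0),(2,0),(2,1),(2,2)]
def pvFlipsB : List Int := [0,1,0,0,1,1,1,0,1]

-- one pass of B's 'for (i, j), f in zip(order, flips)' body at scale s
def pvStep (s : Int) (path : List (Int × Int)) : List (Int × Int) :=
  (pvOrderB.zip pvFlipsB).foldl (fun acc p =>
    acc ++ (if p.2 = 0
      then path.map (fun q => (p.1.1 * s + q.1, p.1.2 * s + q.2))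
      else path.map (fun q => (p.1.1 * s + q.1, p.1.2 * s + (s - 1 - q.2))))) []

-- B's 'for _ in range(n)' loop carrying (path, s)
def pvAltLoop : Nat → List (Int × Int) → Int → List (Int × Int)
  | 0, path, _ => path
  | k + 1, path, s => pvAltLoop k (pvStep s path) (s * 3)

def peano_traversal_alt (image : List (List Int)) : List (Int × Int × Int) :=
  let h : Int := image.length
  let w : Int := (PySem.List.pyGetD image 0 []).length
  let st := if h = w then pvDiv3Loop h.toNat (h, 0) else (0, 0)
  if ¬ (h = w ∧ st.1 = 1) then
    (PySem.List.pyRange 0 h 1).foldl (fun acc i =>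
      acc ++ (PySem.List.pyRange 0 w 1).map (fun j =>
        (i, j, PySem.List.pyGetD (PySem.List.pyGetD image i []) j 0))) []
  else
    (pvAltLoop st.2.toNat [(0, 0)] 1).map (fun p =>
      (p.1, p.2, PySem.List.pyGetD (PySem.List.pyGetD image p.1 []) p.2 0))

-- ===== PRECONDITION & SPEC =====

-- Pre_ excludes exactly the inputs on which Python A raises IndexError: the empty
-- image, and images in which some row is shorter than the first row.
def Pre_peano_traversal (image : List (List Int)) : Prop :=
  image ≠ [] ∧ ∀ row ∈ image, (image.headI).length ≤ row.length
instance (image : List (List Int)) : Decidable (Pre_peano_traversal image) := by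
  unfold Pre_peano_traversal; infer_instance

def pvWitness_peano_traversal : List (List Int) := [[1,2,3],[4,5,6],[7,8,9]]

def Spec_peano_traversal (image : List (List Int)) (out : List (Int × Int × Int)) : Prop := out = peano_traversal_alt image
instance (image : List (List Int)) (out : List (Int × Int × Int)) : Decidable (Spec_peano_traversal image out) := by unfold Spec_peano_traversal; infer_instance

-- ===== CLAIM (what is proved, stated in full; the proofs are below) =====
def Claim_equal_peano_traversal : Prop := ∀ (image : List (List Int)), Dom_peano_traversal image → Pre_peano_traversal image → Spec_peano_traversal image (peano_traversal image)

-- ===== LEMMAS AND PROOFS =====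

-- the while loop's invariant: if it ends with temp' then temp = temp' * 3^(iterations)
theorem pvDiv3Loop_spec (fuel : Nat) : ∀ (temp c : Int),
    ∃ (m : Nat) (t : Int), pvDiv3Loop fuel (temp, c) = (t, c + m) ∧ temp = t * 3 ^ m := by
  induction fuel with
  | zero => intro temp c; exact ⟨0, temp, by simp [pvDiv3Loop]⟩
  | succ fuel ih =>
    intro temp c
    by_cases h : PySem.Int.mod temp 3 = 0 ∧ temp > 1
    · have hdvd : (3 : Int) ∣ temp := (PySem.Int.mod_eq_zero_iff_dvd temp 3).1 h.1
      have hstep : pvDiv3Loop (fuel + 1) (temp, c) = pvDiv3Loop fuel (temp / 3, c + 1) := by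
        simp only [pvDiv3Loop]
        rw [if_pos h, PySem.Int.floordiv_eq_ediv_of_pos (by norm_num)]
      obtain ⟨m, t, hm1, hm2⟩ := ih (temp / 3) (c + 1)
      refine ⟨m + 1, t, ?_, ?_⟩
      · rw [hstep, hm1]
        congr 1
        push_cast
        ring
      · rw [pow_succ]
        calc temp = (temp / 3) * 3 := (Int.ediv_mul_cancel hdvd).symm
          _ = t * 3 ^ m * 3 := by rw [← hm2]
          _ = t * (3 ^ m * 3) := by ring
    · refine ⟨0, temp, ?_, by simp⟩
      simp only [pvDiv3Loop]
      rw [if_neg h]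
      simp

-- (3^(n+1)) // 3 = 3^n
theorem pvPow3_div (n : Nat) : PySem.Int.floordiv ((3 : Int) ^ (n + 1)) 3 = 3 ^ n := by
  rw [PySem.Int.floordiv_eq_ediv_of_pos (by norm_num)]
  rw [pow_succ]
  exact Int.mul_ediv_cancel _ (by norm_num)

-- peel the LAST iteration of B's loop
theorem pvAltLoop_succ (k : Nat) : ∀ (path : List (Int × Int)) (s : Int),
    pvAltLoop (k + 1) path s = pvStep (s * 3 ^ k) (pvAltLoop k path s) := by
  induction k with
  | zero => intro path s; simp [pvAltLoop]
  | succ k ih =>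
    intro path s
    show pvAltLoop (k + 1) (pvStep s path) (s * 3) = _
    rw [ih (pvStep s path) (s * 3)]
    have : s * 3 * 3 ^ k = s * 3 ^ (k + 1) := by ring
    rw [this]
    rfl

-- the heart: A's recursive curve at scale 3^n equals B's iterated path, shifted
-- (direction 1 is its y-mirror)
theorem pvPeanoRec_alt (n : Nat) : ∀ (x y : Int),
    pvPeanoRec n x y (3 ^ n) 0 = (pvAltLoop n [(0,0)] 1).map (fun q => (x + q.1, y + q.2)) ∧
    pvPeanoRec n x y (3 ^ n) 1 = (pvAltLoop n [(0,0)] 1).map (fun q => (x + q.1, y + ((3:Int) ^ n - 1 - q.2))) := by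
  induction n with
  | zero => intro x y; simp [pvPeanoRec, pvAltLoop]
  | succ n ih =>
    intro x y
    have ih0 : ∀ a b : Int, pvPeanoRec n a b (3 ^ n) 0 =
        (pvAltLoop n [(0,0)] 1).map (fun q => (a + q.1, b + q.2)) := fun a b => (ih a b).1
    have ih1 : ∀ a b : Int, pvPeanoRec n a b (3 ^ n) 1 =
        (pvAltLoop n [(0,0)] 1).map (fun q => (a + q.1, b + ((3:Int) ^ n - 1 - q.2))) := fun a b => (ih a b).2
    have hloop : pvAltLoop (n + 1) [(0,0)] 1 = pvStep (3 ^ n) (pvAltLoop n [(0,0)] 1) := by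
      rw [pvAltLoop_succ]; norm_num
    constructor
    · simp only [pvPeanoRec, pvPow3_div, ite_true, pvOrder0, List.foldl_cons, List.foldl_nil,
        List.nil_append, ih0, ih1]
      rw [hloop]
      simp [pvStep, pvOrderB, pvFlipsB, List.map_map]
      repeat'
        first
        | (apply congrArg₂ (· ++ ·))
        | (apply List.map_congr_left
           rintro ⟨a, b⟩ -
           simp only [Function.comp_apply, Prod.mk.injEq]
           constructor <;> first | trivial | rfl | ring)
    · simp only [pvPeanoRec, pvPow3_div, ite_false, one_ne_zero, pvOrder1, List.foldl_cons,
        List.foldl_nil, List.nil_append, ih0, ih1]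
      rw [hloop]
      simp [pvStep, pvOrderB, pvFlipsB, List.map_map]
      repeat'
        first
        | (apply congrArg₂ (· ++ ·))
        | (apply List.map_congr_left
           rintro ⟨a, b⟩ -
           simp only [Function.comp_apply, Prod.mk.injEq]
           constructor <;> first | trivial | rfl | ring)

-- ===== VERDICT (by name: the statement is the Claim_ definition above) =====
theorem peano_traversal_spec : Claim_equal_peano_traversal := by
  unfold Claim_equal_peano_traversal
  intro image _ _
  unfold Spec_peano_traversal peano_traversal peano_traversal_alt pvLinear
  by_cases hw : (image.length : Int) = ((PySem.List.pyGetD image 0 []).length : Int)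
  · simp only [hw, ne_eq, not_true_eq_false, if_false, true_and]
    obtain ⟨m, t, hst, hsz⟩ := pvDiv3Loop_spec (Int.toNat (((PySem.List.pyGetD image 0 []).length : Int))) ((PySem.List.pyGetD image 0 []).length : Int) 0
    rw [hst]
    by_cases ht : t = 1
    · subst ht
      simp only [not_true_eq_false, if_false]
      have hm : ((0 : Int) + m).toNat = m := by omega
      rw [hm, one_mul] at *
      rw [hsz, (pvPeanoRec_alt m 0 0).1]
      simp
    · simp [ht]
  · simp [hw]
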